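-- pv_equiv track=rewrite | github.com/leonardoabezerra/Decryption-Algorithms | Substitution-Cipher/subst_decrypt.py | sort_freq
-- ===== SOURCE A (Python) =====
-- def sort_freq(freq):
--     sorted_items = list(freq.items())
--     for i in range(1, len(sorted_items)):
--         key = sorted_items[i]
--         j = i - 1
--
--         while j >=0 and key[1] > sorted_items[j][1]:
--             sorted_items[j + 1] = sorted_items[j]
--             j -= 1
--         sorted_items[j + 1] = key
--     return sorted_items
-- ===== SOURCE B (Python) =====
-- def sort_freq(freq):
--     # Bucket sort: group items by frequency, then emit buckets in
--     # descending frequency order (stable within a bucket).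
--     buckets = {}
--     for item in freq.items():
--         buckets[item[1]] = buckets.get(item[1], []) + [item]
--     result = []
--     for v in sorted(buckets, reverse=True):
--         result = result + buckets.get(v, [])
--     return result
-- ===== Notes on version B (the rewrite author's own statement) =====
-- stated objective: faster
-- what changed: Replaced the quadratic in-place insertion sort with a bucket table keyed by frequency built in one pass, whose buckets are emitted in descending order of the (distinct) frequency values.
import Mathlib
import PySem

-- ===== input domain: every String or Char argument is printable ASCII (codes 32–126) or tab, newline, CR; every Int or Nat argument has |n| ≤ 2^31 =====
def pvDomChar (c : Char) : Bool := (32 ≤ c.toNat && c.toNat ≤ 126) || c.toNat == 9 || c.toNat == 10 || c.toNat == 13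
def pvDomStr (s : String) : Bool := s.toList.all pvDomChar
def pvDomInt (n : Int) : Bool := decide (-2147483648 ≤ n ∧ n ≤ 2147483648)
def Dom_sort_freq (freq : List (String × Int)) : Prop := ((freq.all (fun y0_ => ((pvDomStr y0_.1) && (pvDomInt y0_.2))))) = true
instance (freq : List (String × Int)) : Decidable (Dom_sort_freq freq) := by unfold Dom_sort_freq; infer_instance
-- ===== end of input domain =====

-- B replaces A's quadratic in-place insertion sort by a one-pass bucket table keyed by
-- frequency, emitted in descending order of the distinct frequency values (faster).


-- ===== PORT A =====
-- inner while loop: 'while j >= 0 and key[1] > sorted_items[j][1]: shift; j -= 1' then 'sorted_items[j+1] = key'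
def pvShiftA (key : String × Int) (xs : List (String × Int)) (j : Int) : List (String × Int) :=
  if _h : 0 ≤ j then
    match PySem.List.pyGet? xs j with
    | none => xs   -- unreachable: j is in range at every call this port makes
    | some xj =>
      if key.2 > xj.2 then
        pvShiftA key (PySem.List.pySetD xs (j + 1) xj) (j - 1)
      else PySem.List.pySetD xs (j + 1) key
  else PySem.List.pySetD xs (j + 1) key
termination_by (j + 1).toNat
decreasing_by omega

def sort_freq (freq : List (String × Int)) : List (String × Int) :=
  (PySem.List.pyRange 1 (freq.length : Int) 1).foldl
    (fun xs i =>
      match PySem.List.pyGet? xs i with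
      | none => xs   -- unreachable: i < len(sorted_items)
      | some key => pvShiftA key xs (i - 1))
    freq

-- ===== PORT B =====
def sort_freq_alt (freq : List (String × Int)) : List (String × Int) :=
  let buckets := freq.foldl (fun d kv => d.modify kv.2 [] (· ++ [kv])) (PySem.Dict.empty)
  let vs := PySem.List.sorted buckets.keys (fun v => v) true
  vs.foldl (fun out v => out ++ buckets.getD v []) []

-- ===== PRECONDITION & SPEC =====
def Spec_sort_freq (freq : List (String × Int)) (out : List (String × Int)) : Prop := out = sort_freq_alt freq
instance (freq : List (String × Int)) (out : List (String × Int)) : Decidable (Spec_sort_freq freq out) := by unfold Spec_sort_freq; infer_instance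

-- ===== CLAIM (what is proved, stated in full; the proofs are below) =====
def Claim_equal_sort_freq : Prop := ∀ (freq : List (String × Int)), Dom_sort_freq freq → Spec_sort_freq freq (sort_freq freq)

-- ===== LEMMAS AND PROOFS =====

-- Stable descending insert (left-to-right form) and the canonical stable descending sort.
def pvIns (a : String × Int) : List (String × Int) → List (String × Int)
  | [] => [a]
  | x :: xs => if a.2 ≤ x.2 then x :: pvIns a xs else a :: x :: xs

def pvC (l : List (String × Int)) : List (String × Int) :=
  l.foldl (fun acc kv => pvIns kv acc) []

theorem pvC_append_singleton (l : List (String × Int)) (a : String × Int) :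
    pvC (l ++ [a]) = pvIns a (pvC l) := by
  simp [pvC, List.foldl_append]

theorem pvIns_mem {a y : String × Int} {l : List (String × Int)} :
    y ∈ pvIns a l ↔ y = a ∨ y ∈ l := by
  induction l with
  | nil => simp [pvIns]
  | cons x xs ih =>
    by_cases h : a.2 ≤ x.2
    · simp [pvIns, h, ih]
      tauto
    · simp [pvIns, h]

theorem pvIns_length (a : String × Int) (l : List (String × Int)) :
    (pvIns a l).length = l.length + 1 := by
  induction l with
  | nil => simp [pvIns]
  | cons x xs ih => by_cases h : a.2 ≤ x.2 <;> simp [pvIns, h, ih]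

theorem pvIns_pairwise {a : String × Int} {l : List (String × Int)}
    (h : l.Pairwise (fun u v => v.2 ≤ u.2)) :
    (pvIns a l).Pairwise (fun u v => v.2 ≤ u.2) := by
  induction l with
  | nil => simp [pvIns]
  | cons x xs ih =>
    rcases List.pairwise_cons.1 h with ⟨hx, hxs⟩
    by_cases hc : a.2 ≤ x.2
    · simp only [pvIns, hc, if_pos]
      refine List.pairwise_cons.2 ⟨?_, ih hxs⟩
      intro y hy
      rcases pvIns_mem.1 hy with rfl | hy
      · exact hc
      · exact hx y hy
    · simp only [pvIns, hc, if_neg, not_false_iff]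
      refine List.pairwise_cons.2 ⟨?_, h⟩
      intro y hy
      rcases hy with _ | hy
      · omega
      · have := hx y (by assumption)
        omega

theorem pvC_pairwise (l : List (String × Int)) :
    (pvC l).Pairwise (fun u v => v.2 ≤ u.2) := by
  suffices h : ∀ (acc : List (String × Int)), acc.Pairwise (fun u v => v.2 ≤ u.2) →
      (l.foldl (fun acc kv => pvIns kv acc) acc).Pairwise (fun u v => v.2 ≤ u.2) by
    exact h [] (by simp)
  induction l with
  | nil => intro acc h; simpa using h
  | cons x xs ih => intro acc h; exact ih _ (pvIns_pairwise h)

theorem pvC_length (l : List (String × Int)) : (pvC l).length = l.length := by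
  suffices h : ∀ (acc : List (String × Int)),
      (l.foldl (fun acc kv => pvIns kv acc) acc).length = l.length + acc.length by
    simpa using h []
  induction l with
  | nil => intro acc; simp
  | cons x xs ih => intro acc; simp [ih, pvIns_length]; omega

theorem pvIns_append_of_ge {a : String × Int} {P ys : List (String × Int)}
    (h : ∀ x ∈ P, a.2 ≤ x.2) : pvIns a (P ++ ys) = P ++ pvIns a ys := by
  induction P with
  | nil => simp
  | cons x xs ih =>
    have hx : a.2 ≤ x.2 := h x (by simp)
    simp only [List.cons_append, pvIns, hx, if_pos]
    rw [ih (fun y hy => h y (by simp [hy]))]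

theorem pvIns_of_lt {a : String × Int} {ys : List (String × Int)}
    (h : ∀ y ∈ ys, y.2 < a.2) : pvIns a ys = a :: ys := by
  cases ys with
  | nil => rfl
  | cons y t =>
    have : ¬ a.2 ≤ y.2 := by have := h y (by simp); omega
    simp [pvIns, this]

theorem pvIns_concat_of_gt {a b : String × Int} (h : b.2 < a.2) (Q : List (String × Int)) :
    pvIns a (Q ++ [b]) = pvIns a Q ++ [b] := by
  induction Q with
  | nil => simp [pvIns]; omega
  | cons x xs ih =>
    by_cases hc : a.2 ≤ x.2 <;> simp [pvIns, hc, ih]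

-- The imperative shifting loop inserts key into the (sorted, descending) prefix P.
theorem pvShiftA_spec (key : String × Int) :
    ∀ (P : List (String × Int)) (x : String × Int) (rest : List (String × Int)),
      P.Pairwise (fun u v => v.2 ≤ u.2) →
      pvShiftA key (P ++ x :: rest) ((P.length : Int) - 1) = pvIns key P ++ rest := by
  intro P
  induction P using List.reverseRecOn with
  | nil =>
    intro x rest _
    rw [pvShiftA]
    simp [pvIns, PySem.List.pySetD_of_nonneg]
  | append_singleton Q b ih =>
    intro x rest hP
    have hQ : Q.Pairwise (fun u v => v.2 ≤ u.2) :=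
      hP.sublist (List.sublist_append_left Q [b])
    have hQb : ∀ y ∈ Q, b.2 ≤ y.2 := by
      intro y hy
      have := List.pairwise_append.1 hP
      exact this.2.2 y hy b (by simp)
    have hlen : ((Q ++ [b]).length : Int) - 1 = (Q.length : Int) := by
      simp
    rw [pvShiftA, hlen]
    have hget : PySem.List.pyGet? (Q ++ [b] ++ x :: rest) (Q.length : Int) = some b := by
      simp [PySem.List.pyGet?_natCast]
    rw [dif_pos (by omega : (0:Int) ≤ (Q.length : Int))]
    simp only [hget]
    by_cases hc : key.2 > b.2
    · rw [if_pos hc]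
      have hset : PySem.List.pySetD (Q ++ [b] ++ x :: rest) ((Q.length : Int) + 1) b
          = Q ++ b :: b :: rest := by
        have hc : ((Q.length : Int) + 1) = ((Q.length + 1 : Nat) : Int) := by push_cast; ring
        rw [hc, PySem.List.pySetD_natCast, List.append_assoc, List.set_append_right _ _ (by simp)]
        simp
      rw [hset]
      have : (Q.length : Int) - 1 + 1 - 1 = (Q.length : Int) - 1 := by ring
      have := ih b (b :: rest) hQ
      rw [show ((Q.length : Int)) - 1 + 1 = (Q.length : Int) by ring] at *
      calc pvShiftA key (Q ++ b :: b :: rest) ((Q.length : Int) - 1)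
          = pvIns key Q ++ b :: rest := by
            simpa using ih b (b :: rest) hQ
        _ = pvIns key (Q ++ [b]) ++ rest := by
            rw [pvIns_concat_of_gt (by omega)]; simp
    · rw [if_neg hc]
      have hset : PySem.List.pySetD (Q ++ [b] ++ x :: rest) ((Q.length : Int) + 1) key
          = Q ++ b :: key :: rest := by
        have hc : ((Q.length : Int) + 1) = ((Q.length + 1 : Nat) : Int) := by push_cast; ring
        rw [hc, PySem.List.pySetD_natCast, List.append_assoc, List.set_append_right _ _ (by simp)]
        simp
      rw [hset]
      have hall : ∀ y ∈ Q ++ [b], key.2 ≤ y.2 := by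
        intro y hy
        rcases List.mem_append.1 hy with hy | hy
        · have := hQb y hy; omega
        · simp at hy; subst hy; omega
      have he : pvIns key (Q ++ [b]) = (Q ++ [b]) ++ pvIns key [] := by
        rw [← pvIns_append_of_ge hall]; simp
      rw [he]
      simp [pvIns]

-- The outer for loop turns the list into pvC of it.
theorem pvOuter (f : List (String × Int)) :
    ∀ (m k : Nat), f.length - k = m → 1 ≤ k → k ≤ f.length →
      (PySem.List.pyRange (k : Int) (f.length : Int) 1).foldl
        (fun xs i =>
          match PySem.List.pyGet? xs i with
          | none => xs
          | some key => pvShiftA key xs (i - 1))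
        (pvC (f.take k) ++ f.drop k) = pvC f := by
  intro m
  induction m with
  | zero =>
    intro k hm h1 hk
    have : k = f.length := by omega
    subst this
    rw [PySem.List.pyRange_one_eq_nil (by omega)]
    simp
  | succ m ih =>
    intro k hm h1 hk
    have hklt : k < f.length := by omega
    rw [PySem.List.pyRange_one_cons (by exact_mod_cast hklt)]
    simp only [List.foldl_cons]
    have hdrop : f.drop k = f[k] :: f.drop (k + 1) :=
      List.drop_eq_getElem_cons hklt
    have hlenC : (pvC (f.take k)).length = k := by
      rw [pvC_length, List.length_take]; omega
    have hget : PySem.List.pyGet? (pvC (f.take k) ++ f.drop k) (k : Int) = some f[k] := by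
      rw [hdrop]
      simp [List.getElem?_append_right, hlenC]
    simp only [hget]
    have hsh : pvShiftA f[k] (pvC (f.take k) ++ f.drop k) ((k : Int) - 1)
        = pvIns f[k] (pvC (f.take k)) ++ f.drop (k + 1) := by
      rw [hdrop]
      have := pvShiftA_spec f[k] (pvC (f.take k)) f[k] (f.drop (k + 1)) (pvC_pairwise _)
      rw [hlenC] at this
      exact this
    rw [hsh]
    have htake : f.take (k + 1) = f.take k ++ [f[k]] := by
      rw [List.take_add_one]
      simp [List.getElem?_eq_getElem hklt]
    have : pvIns f[k] (pvC (f.take k)) = pvC (f.take (k + 1)) := by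
      rw [htake, pvC_append_singleton]
    rw [this]
    have := ih (k + 1) (by omega) (by omega) (by omega)
    exact_mod_cast this

theorem sort_freq_eq_pvC (f : List (String × Int)) : sort_freq f = pvC f := by
  cases f with
  | nil => simp [sort_freq, pvC, PySem.List.pyRange_one_eq_nil]
  | cons a t =>
    unfold sort_freq
    have h1 : pvC ((a :: t).take 1) ++ (a :: t).drop 1 = a :: t := by
      simp [pvC, pvIns]
    have := pvOuter (a :: t) ((a :: t).length - 1) 1 rfl (by omega) (by simp)
    rw [h1] at this
    exact_mod_cast this

-- Values occurring in a flatMap of value-filters all lie in vs.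
theorem pvMemFlat {t : List (String × Int)} {vs : List Int} {x : String × Int}
    (h : x ∈ vs.flatMap (fun v => t.filter (fun kv => kv.2 == v))) : x.2 ∈ vs := by
  rcases List.mem_flatMap.1 h with ⟨v, hv, hx⟩
  have := List.of_mem_filter hx
  simp only [beq_iff_eq] at this
  rw [this]; exact hv

-- B side: the main bucket characterisation of the stable descending sort.
theorem pvMain :
    ∀ (l : List (String × Int)) (vs : List Int),
      vs.Pairwise (· > ·) →
      (∀ v, v ∈ vs ↔ v ∈ l.map (·.2)) →
      pvC l = vs.flatMap (fun v => l.filter (fun kv => kv.2 == v)) := by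
  intro l
  induction l using List.reverseRecOn with
  | nil =>
    intro vs hp hm
    have : vs = [] := by
      apply List.eq_nil_iff_forall_not_mem.2
      intro v hv; simpa using (hm v).1 hv
    subst this
    simp [pvC]
  | append_singleton t a ih =>
    intro vs hp hm
    have ha : a.2 ∈ vs := (hm a.2).2 (by simp)
    obtain ⟨vs₁, vs₂, rfl⟩ := List.append_of_mem ha
    have hsplit := List.pairwise_append.1 hp
    have hv1 : ∀ x ∈ vs₁, x > a.2 := fun x hx => hsplit.2.2 x hx a.2 (by simp)
    have hv2 : ∀ y ∈ vs₂, a.2 > y := (List.pairwise_cons.1 hsplit.2.1).1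
    have hfilt : ∀ v : Int, v ≠ a.2 →
        (t ++ [a]).filter (fun kv => kv.2 == v) = t.filter (fun kv => kv.2 == v) := by
      intro v hv
      rw [List.filter_append]
      have : [a].filter (fun kv => kv.2 == v) = [] := by
        simp [Ne.symm hv]
      simp [this]
    have hfa : (t ++ [a]).filter (fun kv => kv.2 == a.2)
        = t.filter (fun kv => kv.2 == a.2) ++ [a] := by
      rw [List.filter_append]; simp [List.filter]
    rw [pvC_append_singleton]
    by_cases hmem : a.2 ∈ t.map (·.2)
    · -- a's value already has a bucket: vs itself also enumerates t's values
      have hm' : ∀ v, v ∈ vs₁ ++ a.2 :: vs₂ ↔ v ∈ t.map (·.2) := by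
        intro v
        rw [hm v]
        simp only [List.map_append, List.mem_append]
        constructor
        · rintro (h | h)
          · exact h
          · simp at h; rw [h]; exact hmem
        · exact fun h => Or.inl h
      rw [ih _ hp hm']
      rw [List.flatMap_append, List.flatMap_cons, List.flatMap_append, List.flatMap_cons]
      have hX : ∀ x ∈ vs₁.flatMap (fun v => t.filter (fun kv => kv.2 == v)) ++
          t.filter (fun kv => kv.2 == a.2), a.2 ≤ x.2 := by
        intro x hx
        rcases List.mem_append.1 hx with hx | hx
        · have := hv1 x.2 (pvMemFlat hx); omega
        · have := List.of_mem_filter hx; simp only [beq_iff_eq] at this; omega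
      have hY : ∀ y ∈ vs₂.flatMap (fun v => t.filter (fun kv => kv.2 == v)), y.2 < a.2 := by
        intro y hy; exact hv2 y.2 (pvMemFlat hy)
      rw [← List.append_assoc, pvIns_append_of_ge hX, pvIns_of_lt hY]
      have h1 : vs₁.flatMap (fun v => (t ++ [a]).filter (fun kv => kv.2 == v))
          = vs₁.flatMap (fun v => t.filter (fun kv => kv.2 == v)) := by
        apply List.flatMap_congr
        intro v hv; exact hfilt v (by have := hv1 v hv; omega)
      have h2 : vs₂.flatMap (fun v => (t ++ [a]).filter (fun kv => kv.2 == v))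
          = vs₂.flatMap (fun v => t.filter (fun kv => kv.2 == v)) := by
        apply List.flatMap_congr
        intro v hv; exact hfilt v (by have := hv2 v hv; omega)
      rw [h1, h2, hfa]
      simp
    · -- a's value is new: its bucket in t is empty; drop it from vs for the IH
      have hm' : ∀ v, v ∈ vs₁ ++ vs₂ ↔ v ∈ t.map (·.2) := by
        intro v
        constructor
        · intro hv
          have hne : v ≠ a.2 := by
            rcases List.mem_append.1 hv with h | h
            · have := hv1 v h; omega
            · have := hv2 v h; omega
          have : v ∈ (t ++ [a]).map (·.2) := (hm v).1 (by
            rcases List.mem_append.1 hv with h | h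
            · exact List.mem_append.2 (Or.inl h)
            · exact List.mem_append.2 (Or.inr (by simp [h])))
          simp only [List.map_append, List.mem_append] at this
          rcases this with h | h
          · exact h
          · simp at h; omega
        · intro hv
          have : v ∈ vs₁ ++ a.2 :: vs₂ := (hm v).2 (by simp [hv])
          have hne : v ≠ a.2 := by
            intro h; rw [h] at hv; exact hmem hv
          rcases List.mem_append.1 this with h | h
          · exact List.mem_append.2 (Or.inl h)
          · rcases h with _ | h
            · omega
            · exact List.mem_append.2 (Or.inr (by assumption))
      have hp' : (vs₁ ++ vs₂).Pairwise (· > ·) :=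
        hp.sublist (List.Sublist.append (List.Sublist.refl vs₁) (List.sublist_cons_self a.2 vs₂))
      rw [ih _ hp' hm']
      rw [List.flatMap_append, List.flatMap_append, List.flatMap_cons]
      have hX : ∀ x ∈ vs₁.flatMap (fun v => t.filter (fun kv => kv.2 == v)), a.2 ≤ x.2 := by
        intro x hx; have := hv1 x.2 (pvMemFlat hx); omega
      have hY : ∀ y ∈ vs₂.flatMap (fun v => t.filter (fun kv => kv.2 == v)), y.2 < a.2 := by
        intro y hy; exact hv2 y.2 (pvMemFlat hy)
      rw [pvIns_append_of_ge hX, pvIns_of_lt hY]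
      have h1 : vs₁.flatMap (fun v => (t ++ [a]).filter (fun kv => kv.2 == v))
          = vs₁.flatMap (fun v => t.filter (fun kv => kv.2 == v)) := by
        apply List.flatMap_congr
        intro v hv; exact hfilt v (by have := hv1 v hv; omega)
      have h2 : vs₂.flatMap (fun v => (t ++ [a]).filter (fun kv => kv.2 == v))
          = vs₂.flatMap (fun v => t.filter (fun kv => kv.2 == v)) := by
        apply List.flatMap_congr
        intro v hv; exact hfilt v (by have := hv2 v hv; omega)
      have hb : t.filter (fun kv => kv.2 == a.2) = [] := by
        apply List.filter_eq_nil_iff.2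
        intro kv hkv
        simp only [beq_iff_eq]
        intro h; exact hmem (by rw [← h]; exact List.mem_map_of_mem hkv)
      rw [h1, h2, hfa, hb]
      simp

theorem sort_freq_alt_eq_pvC (f : List (String × Int)) : sort_freq_alt f = pvC f := by
  unfold sort_freq_alt
  set bk := f.foldl (fun d kv => d.modify kv.2 [] (· ++ [kv])) (PySem.Dict.empty) with hbkdef
  have hbk : ∀ v, bk.getD v [] = f.filter (fun kv => kv.2 == v) := by
    intro v
    have hfold : f.foldl (fun d kv => d.modify kv.2 [] (· ++ [kv])) (PySem.Dict.empty)
        = (f.map (fun kv => (kv.2, kv))).foldl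
            (fun d p => d.modify p.1 [] (· ++ [p.2])) (PySem.Dict.empty) := by
      rw [List.foldl_map]
    rw [hbkdef, hfold, PySem.Dict.getD_foldl_modify_append, List.filter_map]
    simp [Function.comp_def]
  have hkeysmem : ∀ v, v ∈ bk.keys ↔ v ∈ f.map (·.2) := by
    intro v
    rw [hbkdef, PySem.Dict.keys_foldl_modify_key f (fun kv => kv.2) [] (fun _ x => (· ++ [x]))]
    simp [pysem]
  have hnd : bk.keys.Nodup := by
    rw [hbkdef]
    exact PySem.Dict.nodup_keys_foldl_modify_key f (fun kv => kv.2) [] (fun _ x => (· ++ [x])) _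
      (by simp [pysem])
  set vs := PySem.List.sorted bk.keys (fun v => v) true with hvsdef
  have hperm : vs.Perm bk.keys := PySem.List.sorted_perm _ _ _
  have hndvs : vs.Nodup := hperm.nodup_iff.2 hnd
  have hge : vs.Pairwise (fun a b => b ≤ a) := PySem.List.sorted_pairwise_rev _ _
  have hgt : vs.Pairwise (· > ·) := by
    have := hge.and hndvs
    exact this.imp (fun h => by omega)
  have hmemvs : ∀ v, v ∈ vs ↔ v ∈ f.map (·.2) := by
    intro v
    rw [hvsdef, PySem.List.mem_sorted]
    exact hkeysmem v
  rw [PySem.List.foldl_append_eq_flatMap, List.nil_append]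
  rw [show vs.flatMap (fun v => bk.getD v []) = vs.flatMap (fun v => f.filter (fun kv => kv.2 == v))
      from List.flatMap_congr (fun v _ => hbk v)]
  exact (pvMain f vs hgt hmemvs).symm

-- ===== VERDICT (by name: the statement is the Claim_ definition above) =====
theorem sort_freq_spec : Claim_equal_sort_freq := by
  intro freq _
  unfold Spec_sort_freq
  rw [sort_freq_eq_pvC, sort_freq_alt_eq_pvC]
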